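-- pv_equiv track=rewrite | github.com/engrogerio/python_challenges | timeslots.py | get_free_slices
-- ===== SOURCE A (Python) =====
-- def list_diff(list1, list2):
--     """
--     >>> list_diff([1,2,3,4], [1,2,5,6])
--     [3, 4]
--
--     """
--     out = []
--     for ele in list1:
--         if not ele in list2:
--             out.append(ele)
--     return out
--
-- def get_free_slices(slices, agendas):
--     """
--     >>> get_free_slices([['1:00', '1:30'], ['1:30', '2:00'], ['2:00', '3:00'], ['3:00', '3:30'], ['3:30', '4:00']], [['1:30', '2:00'], ['3:00', '3:30']])
--     [['1:00', '1:30'], ['2:00', '3:00'], ['3:30', '4:00']]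
--
--     """
--     to_remove = []
--     for agenda in agendas:
--         starts = agenda[0]
--         ends = agenda[1]
--         hour_start = [d[0] for d in slices].index(starts)
--         hour_end = [d[1] for d in slices].index(ends)
--         for slice in slices[hour_start: hour_end+1]:
--             to_remove.append(slice)
--     return (list_diff(slices, to_remove))
-- ===== SOURCE B (Python) =====
-- def get_free_slices(slices, agendas):
--     # Sweep-line / difference-array algorithm: instead of extracting each booked
--     # index range and diffing lists, record +1/-1 coverage events per booking,
--     # sweep once over the slices with a running coverage counter, and keep the
--     # slices whose value was never covered.
--     if not agendas:
--         return list(slices)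
--     first_start = {}
--     first_end = {}
--     i = 0
--     for sl in slices:
--         first_start.setdefault(sl[0], i)
--         first_end.setdefault(sl[1], i)
--         i += 1
--     delta = {}
--     for agenda in agendas:
--         lo = first_start[agenda[0]]
--         hi = first_end[agenda[1]]
--         if lo <= hi:
--             delta[lo] = delta.get(lo, 0) + 1
--             delta[hi + 1] = delta.get(hi + 1, 0) - 1
--     covered = set()
--     running = 0
--     i = 0
--     for sl in slices:
--         running += delta.get(i, 0)
--         if running > 0:
--             covered.add(tuple(sl))
--         i += 1
--     return [sl for sl in slices if tuple(sl) not in covered]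
-- ===== Notes on version B (the rewrite author's own statement) =====
-- stated objective: alternative
-- what changed: B uses a sweep-line/difference-array algorithm: it records +1/-1 coverage events per booking in a delta table, sweeps once over the slices with a running coverage counter to collect the covered slice values, and filters in one pass, instead of A's per-agenda linear .index scans, range extraction and quadratic list_diff membership scan.
import Mathlib
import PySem

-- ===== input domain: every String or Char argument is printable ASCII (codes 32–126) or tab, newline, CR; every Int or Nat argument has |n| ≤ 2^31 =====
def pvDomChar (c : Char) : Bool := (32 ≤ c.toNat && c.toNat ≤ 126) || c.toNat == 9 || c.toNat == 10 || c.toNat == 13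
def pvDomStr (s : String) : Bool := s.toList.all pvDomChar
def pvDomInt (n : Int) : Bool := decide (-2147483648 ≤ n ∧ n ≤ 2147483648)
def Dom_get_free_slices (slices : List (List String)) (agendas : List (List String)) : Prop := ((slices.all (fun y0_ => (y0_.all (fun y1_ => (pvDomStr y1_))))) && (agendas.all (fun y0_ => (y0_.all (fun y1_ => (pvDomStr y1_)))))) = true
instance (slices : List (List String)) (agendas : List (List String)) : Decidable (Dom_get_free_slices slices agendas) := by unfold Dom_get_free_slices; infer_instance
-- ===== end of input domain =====

-- B replaces A's per-agenda range extraction + quadratic list_diff with a sweep-line /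
-- difference-array pass: ±1 coverage events per booking, one running-counter sweep over the
-- slices collecting covered values, then one filter (objective: alternative).


-- shared helpers: d[0] and d[1] as total functions (exact where the list has ≥ 2 entries)
def pvFst (sl : List String) : String := (PySem.List.pyGet? sl 0).getD ""
def pvSnd (sl : List String) : String := (PySem.List.pyGet? sl 1).getD ""

-- ===== PORT A =====
def list_diff (list1 list2 : List (List String)) : List (List String) :=
  list1.foldl (fun out ele => if ¬ ele ∈ list2 then out ++ [ele] else out) []

def get_free_slices (slices : List (List String)) (agendas : List (List String)) : List (List String) :=
  let to_remove := agendas.foldl (fun to_remove agenda =>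
    let starts := pvFst agenda
    let ends := pvSnd agenda
    let hour_start : Nat := (PySem.List.index? (slices.map pvFst) starts).getD 0
    let hour_end : Nat := (PySem.List.index? (slices.map pvSnd) ends).getD 0
    to_remove ++ PySem.List.slice slices (some (hour_start : Int)) (some ((hour_end : Int) + 1))) []
  list_diff slices to_remove

-- ===== PORT B =====
-- Source B's 'for sl in slices: setdefault; i += 1' first-index loop
def gfs_index (slices : List (List String)) (i : Nat)
    (d1 d2 : PySem.Dict String Nat) : PySem.Dict String Nat × PySem.Dict String Nat :=
  match slices with
  | [] => (d1, d2)
  | sl :: rest => gfs_index rest (i + 1) (d1.setdefault (pvFst sl) i) (d2.setdefault (pvSnd sl) i)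

-- Source B's event loop: delta[lo] += 1; delta[hi+1] -= 1 for each non-empty booked range
def gfs_delta (first1 first2 : PySem.Dict String Nat) (agendas : List (List String)) : PySem.Dict Nat Int :=
  agendas.foldl (fun delta agenda =>
    let lo : Nat := (first1.get? (pvFst agenda)).getD 0
    let hi : Nat := (first2.get? (pvSnd agenda)).getD 0
    if lo ≤ hi then
      let d1 := delta.insert lo (delta.getD lo 0 + 1)
      d1.insert (hi + 1) (d1.getD (hi + 1) 0 - 1)
    else delta) PySem.Dict.empty

-- Source B's sweep: running coverage counter, collect covered slice values
def gfs_sweep (delta : PySem.Dict Nat Int) : List (List String) → Nat → Int → PySem.Set (List String) → PySem.Set (List String)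
  | [], _, _, cov => cov
  | sl :: rest, i, run, cov =>
    let run' := run + delta.getD i 0
    gfs_sweep delta rest (i + 1) run' (if 0 < run' then PySem.Set.add cov sl else cov)

def get_free_slices_alt (slices : List (List String)) (agendas : List (List String)) : List (List String) :=
  if agendas = [] then slices
  else
  let first := gfs_index slices 0 PySem.Dict.empty PySem.Dict.empty
  let delta := gfs_delta first.1 first.2 agendas
  let covered := gfs_sweep delta slices 0 0 PySem.Set.empty
  slices.filter (fun sl => !(PySem.Set.contains covered sl))

-- ===== PRECONDITION & SPEC =====
-- Pre_ excludes exactly the inputs where Python A raises: with a nonempty agenda list, a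
-- slice or agenda entry with fewer than 2 items (IndexError), or an agenda whose start/end
-- does not occur among the slice starts/ends (ValueError from .index).
def Pre_get_free_slices (slices : List (List String)) (agendas : List (List String)) : Prop :=
  agendas = [] ∨
  ((∀ sl ∈ slices, 2 ≤ sl.length) ∧
   (∀ a ∈ agendas, 2 ≤ a.length ∧ pvFst a ∈ slices.map pvFst ∧ pvSnd a ∈ slices.map pvSnd))
instance (slices : List (List String)) (agendas : List (List String)) : Decidable (Pre_get_free_slices slices agendas) := by unfold Pre_get_free_slices; infer_instance

def pvWitness_get_free_slices : List (List String) × List (List String) :=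
  ([["1:00", "1:30"], ["1:30", "2:00"], ["2:00", "3:00"], ["3:00", "3:30"], ["3:30", "4:00"]],
   [["1:30", "2:00"], ["3:00", "3:30"]])

def Spec_get_free_slices (slices : List (List String)) (agendas : List (List String)) (out : List (List String)) : Prop := out = get_free_slices_alt slices agendas
instance (slices : List (List String)) (agendas : List (List String)) (out : List (List String)) : Decidable (Spec_get_free_slices slices agendas out) := by unfold Spec_get_free_slices; infer_instance

-- ===== CLAIM (what is proved, stated in full; the proofs are below) =====
def Claim_equal_get_free_slices : Prop := ∀ (slices : List (List String)) (agendas : List (List String)), Dom_get_free_slices slices agendas → Pre_get_free_slices slices agendas → Spec_get_free_slices slices agendas (get_free_slices slices agendas)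

-- ===== LEMMAS AND PROOFS =====

-- A's first-occurrence indices of an agenda's start and end
def aLo (slices : List (List String)) (a : List String) : Nat :=
  (PySem.List.index? (slices.map pvFst) (pvFst a)).getD 0
def aHi (slices : List (List String)) (a : List String) : Nat :=
  (PySem.List.index? (slices.map pvSnd) (pvSnd a)).getD 0

-- one booking's contribution to the delta table at index k
def dContrib (lo hi k : Nat) : Int :=
  (if lo ≤ hi ∧ k = lo then 1 else 0) + (if lo ≤ hi ∧ k = hi + 1 then -1 else 0)

-- the running counter's value after index i, as a prefix sum of the delta table
def pvS (delta : PySem.Dict Nat Int) (i j : Nat) : Int :=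
  ((List.range (j + 1)).map (fun k => delta.getD (i + k) 0)).sum

-- B's index-building loop computes first-occurrence indices, i.e. exactly what .index finds
theorem gfs_index_get (slices : List (List String)) (i : Nat) (d1 d2 : PySem.Dict String Nat) (k : String) :
    (gfs_index slices i d1 d2).1.get? k
      = (d1.get? k).or ((PySem.List.index? (slices.map pvFst) k).map (· + i)) ∧
    (gfs_index slices i d1 d2).2.get? k
      = (d2.get? k).or ((PySem.List.index? (slices.map pvSnd) k).map (· + i)) := by
  induction slices generalizing i d1 d2 with
  | nil => simp [gfs_index, PySem.List.index?]
  | cons sl rest ih =>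
    simp only [gfs_index, List.map_cons]
    refine ⟨?_, ?_⟩
    · rw [(ih (i + 1) _ _).1]
      by_cases hk : k = pvFst sl
      · subst hk
        rw [PySem.Dict.get?_setdefault_self, PySem.List.index?_cons_self]
        cases h1 : d1.get? (pvFst sl) <;> simp
      · rw [PySem.Dict.get?_setdefault_of_ne _ _ hk,
            PySem.List.index?_cons_of_ne _ (fun h => hk h.symm)]
        cases h1 : d1.get? k <;> cases h2 : PySem.List.index? (rest.map pvFst) k <;> (simp [Option.or]; try omega)
    · rw [(ih (i + 1) _ _).2]
      by_cases hk : k = pvSnd sl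
      · subst hk
        rw [PySem.Dict.get?_setdefault_self, PySem.List.index?_cons_self]
        cases h2 : d2.get? (pvSnd sl) <;> simp
      · rw [PySem.Dict.get?_setdefault_of_ne _ _ hk,
            PySem.List.index?_cons_of_ne _ (fun h => hk h.symm)]
        cases h1 : d2.get? k <;> cases h2 : PySem.List.index? (rest.map pvSnd) k <;> (simp [Option.or]; try omega)

-- one event-recording step of Source B's booking loop, on the delta table at key k
theorem delta_step (d : PySem.Dict Nat Int) (lo hi k : Nat) :
    ((if lo ≤ hi then
        (d.insert lo (d.getD lo 0 + 1)).insert (hi + 1) ((d.insert lo (d.getD lo 0 + 1)).getD (hi + 1) 0 - 1)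
      else d).getD k 0) = d.getD k 0 + dContrib lo hi k := by
  unfold dContrib
  by_cases hle : lo ≤ hi
  · rw [if_pos hle, PySem.Dict.getD_insert, PySem.Dict.getD_insert, PySem.Dict.getD_insert]
    simp only [hle, true_and]
    split_ifs <;> subst_vars <;> omega
  · rw [if_neg hle]
    simp [hle]

-- the delta table is the pointwise sum of the bookings' event contributions
theorem gfs_delta_fold (first1 first2 : PySem.Dict String Nat) (agendas : List (List String))
    (d : PySem.Dict Nat Int) (k : Nat) :
    (agendas.foldl (fun delta agenda =>
      let lo : Nat := (first1.get? (pvFst agenda)).getD 0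
      let hi : Nat := (first2.get? (pvSnd agenda)).getD 0
      if lo ≤ hi then
        let d1 := delta.insert lo (delta.getD lo 0 + 1)
        d1.insert (hi + 1) (d1.getD (hi + 1) 0 - 1)
      else delta) d).getD k 0
    = d.getD k 0 + (agendas.map (fun a =>
        dContrib ((first1.get? (pvFst a)).getD 0) ((first2.get? (pvSnd a)).getD 0) k)).sum := by
  induction agendas generalizing d with
  | nil => simp
  | cons a t ih =>
    simp only [List.foldl_cons, List.map_cons, List.sum_cons]
    rw [ih]
    have hs : ((fun (delta : PySem.Dict Nat Int) (agenda : List String) =>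
          let lo : Nat := (first1.get? (pvFst agenda)).getD 0
          let hi : Nat := (first2.get? (pvSnd agenda)).getD 0
          if lo ≤ hi then
            let d1 := delta.insert lo (delta.getD lo 0 + 1)
            d1.insert (hi + 1) (d1.getD (hi + 1) 0 - 1)
          else delta) d a).getD k 0
        = d.getD k 0 + dContrib ((first1.get? (pvFst a)).getD 0) ((first2.get? (pvSnd a)).getD 0) k :=
      delta_step d _ _ k
    rw [hs]
    ring

-- prefix sums of one booking's contributions: its 0/1 coverage indicator
theorem prefix_dContrib (lo hi j : Nat) :
    ((List.range (j + 1)).map (fun k => dContrib lo hi k)).sum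
      = if lo ≤ hi ∧ lo ≤ j ∧ j ≤ hi then 1 else 0 := by
  have hind : ∀ (m t : Nat) (c : Int),
      ((List.range m).map (fun k => if k = t then c else 0)).sum = if t < m then c else 0 := by
    intro m t c
    induction m with
    | zero => simp
    | succ m ih =>
      rw [List.range_succ, List.map_append, List.sum_append, ih]
      simp only [List.map_cons, List.map_nil, List.sum_cons, List.sum_nil]
      split_ifs <;> omega
  unfold dContrib
  rw [PySem.List.sum_map_add_int]
  by_cases hle : lo ≤ hi
  · simp only [hle, true_and]
    rw [hind, hind]
    split_ifs <;> omega
  · simp only [hle, false_and, if_false]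
    simp

-- exchanging the two summations (over range and over the agenda list)
theorem sum_swap_list (m : Nat) (l : List (List String)) (f : List String → Nat → Int) :
    ((List.range m).map (fun k => (l.map (fun a => f a k)).sum)).sum
      = (l.map (fun a => ((List.range m).map (f a)).sum)).sum := by
  induction l with
  | nil => simp
  | cons a t ih =>
    simp only [List.map_cons, List.sum_cons]
    rw [← ih, ← PySem.List.sum_map_add_int]

-- membership in the sweep's covered set: the running counter was positive at that index
theorem mem_gfs_sweep (delta : PySem.Dict Nat Int) (l : List (List String))
    (i : Nat) (run : Int) (cov : PySem.Set (List String)) (x : List String) :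
    x ∈ gfs_sweep delta l i run cov
      ↔ x ∈ cov ∨ ∃ j, 0 < run + pvS delta i j ∧ l[j]? = some x := by
  induction l generalizing i run cov with
  | nil => simp [gfs_sweep]
  | cons sl rest ih =>
    have hS0 : pvS delta i 0 = delta.getD i 0 := by simp [pvS]
    have hSshift : ∀ j, pvS delta i (j + 1) = delta.getD i 0 + pvS delta (i + 1) j := by
      intro j
      unfold pvS
      rw [List.range_succ_eq_map, List.map_cons, List.sum_cons, List.map_map]
      have : ((fun k => delta.getD (i + k) 0) ∘ Nat.succ) = (fun k => delta.getD (i + 1 + k) 0) := by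
        funext k
        simp only [Function.comp]
        congr 1
        omega
      rw [this]
      simp
    simp only [gfs_sweep]
    rw [ih]
    constructor
    · rintro (hcov | ⟨j, hpos, hj⟩)
      · by_cases hr : 0 < run + delta.getD i 0
        · rw [if_pos hr] at hcov
          rcases (PySem.Set.mem_add _ _ _).mp hcov with h | h
          · exact Or.inl h
          · exact Or.inr ⟨0, by rw [hS0]; exact hr, by simp [h]⟩
        · rw [if_neg hr] at hcov
          exact Or.inl hcov
      · refine Or.inr ⟨j + 1, ?_, by simpa using hj⟩
        rw [hSshift]
        omega
    · rintro (hcov | ⟨j, hpos, hj⟩)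
      · by_cases hr : 0 < run + delta.getD i 0
        · rw [if_pos hr]
          exact Or.inl ((PySem.Set.mem_add _ _ _).mpr (Or.inl hcov))
        · rw [if_neg hr]
          exact Or.inl hcov
      · cases j with
        | zero =>
          rw [hS0] at hpos
          have hx : sl = x := by simpa using hj
          rw [if_pos hpos]
          exact Or.inl ((PySem.Set.mem_add _ _ _).mpr (Or.inr hx.symm))
        | succ j =>
          refine Or.inr ⟨j, ?_, by simpa using hj⟩
          rw [hSshift] at hpos
          omega

-- membership in a booked range slices[lo : hi+1]
theorem mem_drop_take (xs : List (List String)) (lo hi : Nat) (x : List String) :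
    x ∈ (xs.drop lo).take (hi + 1 - lo) ↔ ∃ j, lo ≤ j ∧ j ≤ hi ∧ xs[j]? = some x := by
  rw [List.mem_iff_getElem?]
  constructor
  · rintro ⟨i, hi'⟩
    rw [List.getElem?_take] at hi'
    by_cases hlt : i < hi + 1 - lo
    · rw [if_pos hlt, List.getElem?_drop] at hi'
      exact ⟨lo + i, by omega, by omega, hi'⟩
    · rw [if_neg hlt] at hi'
      exact absurd hi' (by simp)
  · rintro ⟨j, h1, h2, hj⟩
    refine ⟨j - lo, ?_⟩
    rw [List.getElem?_take, if_pos (by omega), List.getElem?_drop]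
    have : lo + (j - lo) = j := by omega
    rw [this]
    exact hj

-- a booked range's members, phrased by index
theorem mem_slice_booked (slices : List (List String)) (a x : List String) :
    x ∈ PySem.List.slice slices (some ((aLo slices a : Nat) : Int)) (some (((aHi slices a : Nat) : Int) + 1))
      ↔ ∃ j, aLo slices a ≤ j ∧ j ≤ aHi slices a ∧ slices[j]? = some x := by
  have hcast : ((aHi slices a : Nat) : Int) + 1 = (((aHi slices a + 1 : Nat)) : Int) := by push_cast; ring
  rw [hcast, PySem.List.slice_natCast]
  exact mem_drop_take slices _ _ x

-- a 0/1 indicator sum is positive iff some element satisfies the predicate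
theorem sum_ind_pos_iff (l : List (List String)) (p : List String → Prop) [DecidablePred p] :
    0 < (l.map (fun a => if p a then (1 : Int) else 0)).sum ↔ ∃ a ∈ l, p a := by
  rw [show (fun a => if p a then (1 : Int) else 0)
      = (fun a => if (decide (p a) : Bool) = true then (1 : Int) else 0) from by funext a; simp]
  rw [PySem.List.sum_map_ite_one_zero, Int.natCast_pos, List.countP_pos_iff]
  simp

theorem get_free_slices_spec : Claim_equal_get_free_slices := by
  intro slices agendas _ _
  unfold Spec_get_free_slices get_free_slices get_free_slices_alt list_diff
  by_cases hA : agendas = []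
  · subst hA
    rw [PySem.List.foldl_append_ite_eq_filter]
    simp
  rw [if_neg hA]
  -- A's side: to_remove as a flatMap of booked ranges
  have hAfun : (fun (to_remove : List (List String)) (agenda : List String) =>
        to_remove ++ PySem.List.slice slices
          (some (((PySem.List.index? (slices.map pvFst) (pvFst agenda)).getD 0 : Nat) : Int))
          (some ((((PySem.List.index? (slices.map pvSnd) (pvSnd agenda)).getD 0 : Nat) : Int) + 1)))
      = fun (acc : List (List String)) (agenda : List String) =>
          acc ++ PySem.List.slice slices (some ((aLo slices agenda : Nat) : Int)) (some (((aHi slices agenda : Nat) : Int) + 1)) := rfl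
  rw [hAfun, PySem.List.foldl_append_eq_flatMap, PySem.List.foldl_append_ite_eq_filter]
  simp only [List.nil_append]
  -- B's side: the first-occurrence dicts hold exactly what .index finds
  have hidx1 : ∀ k, (((gfs_index slices 0 PySem.Dict.empty PySem.Dict.empty).1.get? k).getD 0)
      = (PySem.List.index? (slices.map pvFst) k).getD 0 := by
    intro k
    rw [(gfs_index_get slices 0 _ _ k).1, PySem.Dict.get?_empty]
    cases h : PySem.List.index? (slices.map pvFst) k <;> simp [Option.or]
  have hidx2 : ∀ k, (((gfs_index slices 0 PySem.Dict.empty PySem.Dict.empty).2.get? k).getD 0)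
      = (PySem.List.index? (slices.map pvSnd) k).getD 0 := by
    intro k
    rw [(gfs_index_get slices 0 _ _ k).2, PySem.Dict.get?_empty]
    cases h : PySem.List.index? (slices.map pvSnd) k <;> simp [Option.or]
  -- key fact: membership in B's covered set = membership in A's to_remove
  have hkey : ∀ x, x ∈ gfs_sweep (gfs_delta (gfs_index slices 0 PySem.Dict.empty PySem.Dict.empty).1
        (gfs_index slices 0 PySem.Dict.empty PySem.Dict.empty).2 agendas) slices 0 0 PySem.Set.empty
      ↔ x ∈ agendas.flatMap (fun a =>
          PySem.List.slice slices (some ((aLo slices a : Nat) : Int)) (some (((aHi slices a : Nat) : Int) + 1))) := by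
    intro x
    -- the sweep's prefix sums count the bookings covering each index
    have hSval : ∀ j, pvS (gfs_delta (gfs_index slices 0 PySem.Dict.empty PySem.Dict.empty).1
          (gfs_index slices 0 PySem.Dict.empty PySem.Dict.empty).2 agendas) 0 j
        = (agendas.map (fun a => if aLo slices a ≤ aHi slices a ∧ aLo slices a ≤ j ∧ j ≤ aHi slices a then (1 : Int) else 0)).sum := by
      intro j
      unfold pvS
      have hfun : (fun k => (gfs_delta (gfs_index slices 0 PySem.Dict.empty PySem.Dict.empty).1
            (gfs_index slices 0 PySem.Dict.empty PySem.Dict.empty).2 agendas).getD (0 + k) 0)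
          = fun k => (agendas.map (fun a => dContrib (aLo slices a) (aHi slices a) k)).sum := by
        funext k
        rw [Nat.zero_add]
        unfold gfs_delta
        rw [gfs_delta_fold, PySem.Dict.getD_empty]
        simp only [hidx1, hidx2, aLo, aHi, zero_add]
      rw [hfun, sum_swap_list]
      refine congrArg List.sum (List.map_congr_left ?_)
      intro a _
      exact prefix_dContrib _ _ _
    rw [mem_gfs_sweep, List.mem_flatMap]
    constructor
    · rintro (h | ⟨j, hpos, hj⟩)
      · exact absurd h (by simp [PySem.Set.empty])
      · rw [zero_add, hSval, sum_ind_pos_iff] at hpos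
        obtain ⟨a, ha, _, h1, h2⟩ := hpos
        exact ⟨a, ha, (mem_slice_booked slices a x).mpr ⟨j, h1, h2, hj⟩⟩
    · rintro ⟨a, ha, hmem⟩
      obtain ⟨j, h1, h2, hj⟩ := (mem_slice_booked slices a x).mp hmem
      refine Or.inr ⟨j, ?_, hj⟩
      rw [zero_add, hSval, sum_ind_pos_iff]
      exact ⟨a, ha, le_trans h1 h2, h1, h2⟩
  refine List.filter_congr (fun x _ => ?_)
  rw [PySem.Set.contains_eq_decide, ← decide_not]
  exact decide_eq_decide.mpr (not_congr (hkey x).symm)
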